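-- pv_equiv track=rewrite | github.com/rahulswimmer/scalar_assignments_hw | findpairsinarrayswhosesumispresent.py | solve
-- ===== SOURCE A (Python) =====
-- def solve(A):
--     count=0
--     setArr = set(A)
--     for i in range(len(A)):
--         for j in range(i+1,len(A)):
--             if A[i]+A[j] in setArr:
--                 count+=1
--     return count
-- ===== SOURCE B (Python) =====
-- def solve(A):
--     S = set(A)
--     total = 0
--     for x in A:
--         for y in A:
--             if x + y in S:
--                 total += 1
--     diag = 0
--     for x in A:
--         if x + x in S:
--             diag += 1
--     return (total - diag) // 2
-- ===== Notes on version B (the rewrite author's own statement) =====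
-- stated objective: alternative
-- what changed: B replaces the triangular i<j index loops with an ordered full cross-product count over the values, subtracts the diagonal (x+x hits) and halves the result using the symmetry of addition.
import Mathlib
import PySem

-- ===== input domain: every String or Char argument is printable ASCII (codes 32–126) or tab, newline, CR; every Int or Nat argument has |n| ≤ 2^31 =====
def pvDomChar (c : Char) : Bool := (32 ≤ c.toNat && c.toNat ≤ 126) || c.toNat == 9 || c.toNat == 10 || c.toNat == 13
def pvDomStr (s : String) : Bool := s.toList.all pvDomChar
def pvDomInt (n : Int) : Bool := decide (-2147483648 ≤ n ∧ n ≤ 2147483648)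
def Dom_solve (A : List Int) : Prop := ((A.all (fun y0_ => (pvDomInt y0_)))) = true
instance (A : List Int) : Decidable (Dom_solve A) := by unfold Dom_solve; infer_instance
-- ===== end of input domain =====

-- B counts the ordered full cross-product of values, subtracts the diagonal (x+x hits) and halves
-- by symmetry of +, instead of A's triangular i<j index loops; alternative decomposition, same cost.

-- ===== PORT A =====
def solve (A : List Int) : Int :=
  let setArr : PySem.Set Int := PySem.Set.ofList A
  (PySem.List.pyRange 0 (A.length : Int) 1).foldl (fun count i =>
    (PySem.List.pyRange (i + 1) (A.length : Int) 1).foldl (fun count j =>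
      if PySem.Set.contains setArr (PySem.List.pyGetD A i 0 + PySem.List.pyGetD A j 0)
      then count + 1 else count) count) 0

-- ===== PORT B =====
def solve_alt (A : List Int) : Int :=
  let S : PySem.Set Int := PySem.Set.ofList A
  let total : Int := A.foldl (fun total x =>
    A.foldl (fun total y => if PySem.Set.contains S (x + y) then total + 1 else total) total) 0
  let diag : Int := A.foldl (fun diag x =>
    if PySem.Set.contains S (x + x) then diag + 1 else diag) 0
  PySem.Int.floordiv (total - diag) 2

-- ===== PRECONDITION & SPEC =====
def Spec_solve (A : List Int) (out : Int) : Prop := out = solve_alt A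
instance (A : List Int) (out : Int) : Decidable (Spec_solve A out) := by unfold Spec_solve; infer_instance

-- ===== CLAIM (what is proved, stated in full; the proofs are below) =====
def Claim_equal_solve : Prop := ∀ (A : List Int), Dom_solve A → Spec_solve A (solve A)

-- ===== LEMMAS AND PROOFS =====

/-- number of unordered pairs (head with each later element, recursively) satisfying `p`. -/
def pairCnt (p : Int → Int → Bool) : List Int → Nat
  | [] => 0
  | x :: t => t.countP (fun y => p x y) + pairCnt p t

theorem sum_map_ite_one_zero_nat (t : List Int) (q : Int → Bool) :
    (t.map (fun x => if q x then 1 else 0)).sum = t.countP q := by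
  induction t with
  | nil => rfl
  | cons a t ih => simp [List.countP_cons, ih]; split_ifs <;> omega

theorem key_sum (p : Int → Int → Bool) (hp : ∀ x y, p x y = p y x) :
    ∀ (l : List Int),
      (l.map (fun x => l.countP (fun y => p x y))).sum
        = 2 * pairCnt p l + l.countP (fun x => p x x) := by
  intro l
  induction l with
  | nil => simp [pairCnt]
  | cons a t ih =>
    simp only [List.map_cons, List.sum_cons, List.countP_cons, pairCnt]
    rw [List.sum_map_add, ih, sum_map_ite_one_zero_nat]
    have hc : t.countP (fun x => p x a) = t.countP (fun y => p a y) :=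
      List.countP_congr (fun x _ => by rw [hp])
    rw [hc]
    split_ifs <;> omega

theorem sum_map_natCast_countP (t : List Int) (f : Int → Nat) :
    (t.map (fun x => ((f x : Nat) : Int))).sum = ((t.map f).sum : Int) := by
  induction t with
  | nil => rfl
  | cons a t ih => simp [ih]

theorem outer_loop (c : Int → Bool) (A : List Int) :
    ∀ (d k : Nat), A.length = k + d → ∀ (acc : Int),
    (PySem.List.pyRange (k : Int) (A.length : Int) 1).foldl
      (fun count i => (PySem.List.pyRange (i + 1) (A.length : Int) 1).foldl
        (fun count j => if c (PySem.List.pyGetD A i 0 + PySem.List.pyGetD A j 0)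
          then count + 1 else count) count) acc
    = acc + (pairCnt (fun x y => c (x + y)) (A.drop k) : Int) := by
  intro d
  induction d with
  | zero =>
    intro k hk acc
    rw [PySem.List.pyRange_one_eq_nil (by omega)]
    rw [List.drop_of_length_le (by omega)]
    simp [pairCnt]
  | succ d ih =>
    intro k hk acc
    have hklt : k < A.length := by omega
    rw [PySem.List.pyRange_one_cons (by exact_mod_cast (by omega : (k:Int) < (A.length:Int)))]
    rw [List.foldl_cons]
    have hin := PySem.List.foldl_pyRange_pyGetD' A 0
      (fun count y => if c (PySem.List.pyGetD A (k : Int) 0 + y) then count + 1 else count)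
      acc (a := (k : Int) + 1) (by omega)
    rw [hin]
    rw [PySem.List.foldl_if_add_one]
    have hget : PySem.List.pyGetD A (k : Int) 0 = A[k] := by
      rw [PySem.List.pyGetD_natCast]
      exact List.getD_eq_getElem A 0 hklt
    have htonat : ((k : Int) + 1).toNat = k + 1 := by omega
    rw [hget, htonat]
    have hih := ih (k + 1) (by omega)
      (acc + (List.countP (fun y => c (A[k] + y)) (List.drop (k + 1) A) : Int))
    push_cast at hih
    rw [hih, List.drop_eq_getElem_cons hklt]
    simp [pairCnt]
    ring

theorem solve_eq_pairCnt (A : List Int) :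
    solve A = (pairCnt (fun x y => PySem.Set.contains (PySem.Set.ofList A) (x + y)) A : Int) := by
  show (PySem.List.pyRange 0 (A.length : Int) 1).foldl (fun count i =>
      (PySem.List.pyRange (i + 1) (A.length : Int) 1).foldl (fun count j =>
        if PySem.Set.contains (PySem.Set.ofList A) (PySem.List.pyGetD A i 0 + PySem.List.pyGetD A j 0)
        then count + 1 else count) count) 0 = _
  have h := outer_loop (PySem.Set.contains (PySem.Set.ofList A)) A A.length 0 (by omega) 0
  push_cast at h
  rw [h]
  rw [List.drop_zero]
  ring

theorem solve_alt_eq (A : List Int) :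
    solve_alt A = (pairCnt (fun x y => PySem.Set.contains (PySem.Set.ofList A) (x + y)) A : Int) := by
  show PySem.Int.floordiv
      ((A.foldl (fun total x => A.foldl (fun total y =>
          if PySem.Set.contains (PySem.Set.ofList A) (x + y) then total + 1 else total) total) 0)
        - (A.foldl (fun diag x =>
          if PySem.Set.contains (PySem.Set.ofList A) (x + x) then diag + 1 else diag) 0)) 2 = _
  set p : Int → Int → Bool := fun x y => PySem.Set.contains (PySem.Set.ofList A) (x + y) with hpdef
  have houter : (fun (total : Int) x => A.foldl (fun total y =>
      if PySem.Set.contains (PySem.Set.ofList A) (x + y) then total + 1 else total) total)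
      = fun (total : Int) x => total + (A.countP (fun y => p x y) : Int) := by
    funext total x
    exact PySem.List.foldl_if_add_one (fun y => PySem.Set.contains (PySem.Set.ofList A) (x + y)) A total
  rw [houter, PySem.List.foldl_add,
      PySem.List.foldl_if_add_one (fun x => PySem.Set.contains (PySem.Set.ofList A) (x + x)) A 0]
  rw [sum_map_natCast_countP]
  have hsym : ∀ x y, p x y = p y x := by
    intro x y; simp only [hpdef, Int.add_comm]
  rw [key_sum p hsym A]
  push_cast
  rw [show (0 : Int) + (2 * (pairCnt p A : Int) + (A.countP (fun x => p x x) : Int))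
        - (0 + (A.countP (fun x => p x x) : Int)) = 2 * (pairCnt p A : Int) by ring]
  rw [PySem.Int.floordiv_eq_ediv_of_pos (by omega)]
  omega

-- ===== VERDICT (by name: the statement is the Claim_ definition above) =====
theorem solve_spec : Claim_equal_solve := by
  intro A _
  unfold Spec_solve
  rw [solve_eq_pairCnt, solve_alt_eq]
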